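-- pv_equiv track=rewrite | github.com/LiQian2023/daily_practice_py | 24.11.24_leetcode/practice.py | takeAttendance
-- ===== SOURCE A (Python) =====
-- def takeAttendance(records):
--     """
--     :type records: List[int]
--     :rtype: int
--     """
--     length = len(records)
--     l, r = 0, length - 1
--     while l <= r:
--         m = (l + r) // 2
--         if records[m] == m:
--             l = m + 1
--         else:
--             r = m - 1
--     return l
-- ===== SOURCE B (Python) =====
-- def takeAttendance(records):
--     """
--     :type records: List[int]
--     :rtype: int
--     """
--     def helper(l, r):
--         if l > r:
--             return l
--         m = l + (r - l) // 2
--         if records[m] == m: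
--             return helper(m + 1, r)
--         return helper(l, m - 1)
--     return helper(0, len(records) - 1)
-- ===== Notes on version B (the rewrite author's own statement) =====
-- stated objective: alternative
-- what changed: Replaces the iterative two-pointer while loop by a recursive divide-and-conquer helper(l, r) with the overflow-safe midpoint l + (r - l) // 2 and an explicit l > r base case.
import Mathlib
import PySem

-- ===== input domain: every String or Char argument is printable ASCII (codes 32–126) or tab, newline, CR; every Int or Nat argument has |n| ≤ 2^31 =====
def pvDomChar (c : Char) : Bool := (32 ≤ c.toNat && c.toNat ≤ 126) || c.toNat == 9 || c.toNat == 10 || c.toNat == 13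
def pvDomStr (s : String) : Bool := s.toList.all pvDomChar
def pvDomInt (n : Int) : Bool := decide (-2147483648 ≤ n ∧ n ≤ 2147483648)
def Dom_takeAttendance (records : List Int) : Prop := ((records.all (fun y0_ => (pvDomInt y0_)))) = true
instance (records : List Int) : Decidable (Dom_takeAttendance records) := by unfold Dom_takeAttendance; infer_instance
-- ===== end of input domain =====

-- B replaces A's iterative two-pointer while loop by a recursive divide-and-conquer
-- helper with the overflow-safe midpoint l + (r - l) // 2; same results, same cost.


-- ===== PORT A =====
-- the while loop of A, as structural recursion on the gap r - l.
-- records[m] is ported as pyGetD … 0: on every state the loop reaches from the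
-- initial call (0 ≤ l ≤ m ≤ r ≤ len-1) the index is in range, so Python never raises here.
def pvLoopA (records : List Int) (l r : Int) : Int :=
  if h : l ≤ r then
    let m := PySem.Int.floordiv (l + r) 2
    if PySem.List.pyGetD records m 0 = m then
      pvLoopA records (m + 1) r
    else
      pvLoopA records l (m - 1)
  else l
termination_by (r + 1 - l).toNat
decreasing_by
  · have := PySem.Int.floordiv_two_mid_bounds h; omega
  · have := PySem.Int.floordiv_two_mid_bounds h; omega

def takeAttendance (records : List Int) : Int :=
  let length : Int := (records.length : Int)
  pvLoopA records 0 (length - 1)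

-- ===== PORT B =====
-- midpoint bounds for B's termination (cited by pvHelperB's decreasing_by)
theorem pvMidB_bounds (l r : Int) (h : l ≤ r) :
    l ≤ l + PySem.Int.floordiv (r - l) 2 ∧ l + PySem.Int.floordiv (r - l) 2 ≤ r := by
  rw [PySem.Int.floordiv_eq_ediv_of_pos (by norm_num)]
  omega

def pvHelperB (records : List Int) (l r : Int) : Int :=
  if h : l > r then l
  else
    let m := l + PySem.Int.floordiv (r - l) 2
    if PySem.List.pyGetD records m 0 = m then
      pvHelperB records (m + 1) r
    else
      pvHelperB records l (m - 1)
termination_by (r + 1 - l).toNat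
decreasing_by
  · have := pvMidB_bounds l r (by omega); omega
  · have := pvMidB_bounds l r (by omega); omega

def takeAttendance_alt (records : List Int) : Int :=
  pvHelperB records 0 ((records.length : Int) - 1)

-- ===== PRECONDITION & SPEC =====
def Spec_takeAttendance (records : List Int) (out : Int) : Prop := out = takeAttendance_alt records
instance (records : List Int) (out : Int) : Decidable (Spec_takeAttendance records out) := by unfold Spec_takeAttendance; infer_instance

-- ===== CLAIM (what is proved, stated in full; the proofs are below) =====
def Claim_equal_takeAttendance : Prop := ∀ (records : List Int), Dom_takeAttendance records → Spec_takeAttendance records (takeAttendance records)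

-- ===== LEMMAS AND PROOFS =====
-- the two midpoint formulas agree on integers
theorem pvMid_eq (l r : Int) :
    l + PySem.Int.floordiv (r - l) 2 = PySem.Int.floordiv (l + r) 2 := by
  rw [PySem.Int.floordiv_eq_ediv_of_pos (by norm_num),
      PySem.Int.floordiv_eq_ediv_of_pos (by norm_num)]
  omega

theorem pvLoop_eq_helper (records : List Int) (l r : Int) :
    pvLoopA records l r = pvHelperB records l r := by
  by_cases h : l ≤ r
  · have hb := PySem.Int.floordiv_two_mid_bounds h
    rw [pvLoopA.eq_def, pvHelperB.eq_def]
    simp only [dif_pos h, dif_neg (by omega : ¬ l > r), pvMid_eq l r]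
    split
    · exact pvLoop_eq_helper records _ r
    · exact pvLoop_eq_helper records l _
  · rw [pvLoopA.eq_def, pvHelperB.eq_def]
    simp only [dif_neg h, dif_pos (by omega : l > r)]
termination_by (r + 1 - l).toNat
decreasing_by
  · omega
  · omega

-- ===== VERDICT (by name: the statement is the Claim_ definition above) =====
theorem takeAttendance_spec : Claim_equal_takeAttendance := by
  intro records _
  unfold Spec_takeAttendance takeAttendance takeAttendance_alt
  exact pvLoop_eq_helper records 0 ((records.length : Int) - 1)
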